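-- pv_equiv track=rewrite | github.com/Hee-Jae/Algorithm | programmers/스타수열.py | solution
-- ===== SOURCE A (Python) =====
-- def solution(a):
--     answer = -1
--     if(len(a) <= 1): return 0
--     info = [[] for _ in range(500001)]
--     idx = 0
--     for b in a:
--       info[b].append(idx)
--       idx += 1
--
--     length = 0; alen = len(a)
--     for i in range(len(info)):
--       length = 0
--       prev = -1
--       for j in range(len(info[i])):
--         if(info[i][j] == 0):
--           if(info[i][j] >= alen-1): continue
--           if(j < len(info[i])-1 and info[i][j]+1 == info[i][j+1]): continue
--           prev = info[i][j]+1
--           length += 2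
--         elif(info[i][j]-1 == info[i][j-1] or info[i][j]-1 == prev):
--           if(info[i][j] >= alen-1): continue
--           if(j < len(info[i])-1 and info[i][j]+1 == info[i][j+1]): continue
--           prev = info[i][j]+1
--           length += 2
--         else:
--           prev = info[i][j]-1
--           length += 2
--       if(answer < length):
--         answer = length
--     return answer
-- ===== SOURCE B (Python) =====
-- def solution(a):
--     if len(a) <= 1:
--         return 0
--     n = len(a)
--     best = 0
--     for x in set(a):
--         cnt = 0
--         i = 0
--         while i + 1 < n:
--             if (a[i] == x or a[i + 1] == x) and a[i] != a[i + 1]: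
--                 cnt += 2
--                 i += 2
--             else:
--                 i += 1
--         if cnt > best:
--             best = cnt
--     return best
-- ===== Notes on version B (the rewrite author's own statement) =====
-- stated objective: simpler
-- what changed: Replaces the 500001-entry index table and the per-bucket index loop with lookback/lookahead bookkeeping by a direct greedy window scan of the list for each distinct value present, taking the max starting at 0.
-- outside the precondition, e.g. on solution([-1, 500000]): A returns 0, B returns 2
import Mathlib
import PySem

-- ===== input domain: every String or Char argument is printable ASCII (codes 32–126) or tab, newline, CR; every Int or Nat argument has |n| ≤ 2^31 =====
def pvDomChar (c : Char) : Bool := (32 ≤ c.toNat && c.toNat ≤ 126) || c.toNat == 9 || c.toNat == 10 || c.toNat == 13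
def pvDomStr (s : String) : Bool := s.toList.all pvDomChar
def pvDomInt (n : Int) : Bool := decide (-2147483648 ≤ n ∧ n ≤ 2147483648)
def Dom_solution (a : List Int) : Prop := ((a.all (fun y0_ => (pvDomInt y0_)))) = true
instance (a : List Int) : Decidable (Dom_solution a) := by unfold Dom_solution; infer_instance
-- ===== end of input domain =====

-- B replaces A's 500001-entry index table and per-bucket index loop by a greedy window scan
-- of the list for each distinct value present (simpler; same results on all inputs in Pre_).


-- ===== PORT A =====
-- info[b].append(idx): Python list cell update; negative b indexes from the end (wraparound)
def aStore (arr : Array (List Int)) (p : Int × Int) : Array (List Int) :=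
  let bi : Int := if p.2 < 0 then p.2 + 500001 else p.2
  arr.modify bi.toNat (fun l => l ++ [p.1])

-- body of A's inner 'for j in range(len(info[i]))' loop; state = (length, prev)
def aBody (alen : Int) (v : List Int) (st : Int × Int) (j : Nat) : Int × Int :=
  let p := v.getD j 0
  if p = 0 then
    if alen - 1 ≤ p then st
    else if j + 1 < v.length ∧ v.getD (j + 1) 0 = p + 1 then st
    else (st.1 + 2, p + 1)
  else if PySem.List.pyGet? v ((j : Int) - 1) = some (p - 1) ∨ p - 1 = st.2 then
    if alen - 1 ≤ p then st
    else if j + 1 < v.length ∧ v.getD (j + 1) 0 = p + 1 then st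
    else (st.1 + 2, p + 1)
  else (st.1 + 2, p - 1)

-- 'info = [[] for _ in range(500001)]' then the first for-loop
def buildInfo (a : List Int) : Array (List Int) :=
  (PySem.List.enumerate a 0).foldl aStore (Array.replicate 500001 [])

-- one iteration of A's outer 'for i in range(len(info))' loop
def outerBody (alen : Int) (info : Array (List Int)) (answer : Int) (i : Int) : Int :=
  let v := info.getD i.toNat []
  let st := (List.range v.length).foldl (aBody alen v) (0, -1)
  if answer < st.1 then st.1 else answer

def solution (a : List Int) : Int :=
  if a.length ≤ 1 then 0 else
    (PySem.List.pyRange 0 500001 1).foldl (outerBody a.length (buildInfo a)) (-1)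

-- ===== PORT B =====
-- the 'while i + 1 < n' window scan of Source B; advancing i by 1/2 = dropping 1/2 head elements
def bScan (x : Int) : List Int → Int
  | y :: z :: rest => if (y = x ∨ z = x) ∧ y ≠ z then 2 + bScan x rest else bScan x (z :: rest)
  | _ => 0

def solution_alt (a : List Int) : Int :=
  if a.length ≤ 1 then 0 else
    (PySem.Set.ofList a).foldl
      (fun best x =>
        let cnt := bScan x a
        if best < cnt then cnt else best)
      0

-- ===== PRECONDITION & SPEC =====
-- Pre_ excludes lists with an element outside [-500001, 500000], on which A raises IndexError
-- on its fixed-size table, and lists with two elements differing by exactly 500001, on which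
-- Python's negative-index wraparound silently stores value v - 500001 in the same table row
-- as value v — an accident of A's table size that merges two distinct values.
def Pre_solution (a : List Int) : Prop :=
  ∀ x ∈ a, -500001 ≤ x ∧ x ≤ 500000 ∧ ∀ y ∈ a, x - y ≠ 500001
instance (a : List Int) : Decidable (Pre_solution a) := by unfold Pre_solution; infer_instance

def pvWitness_solution : List Int := [0, 1, 0, 2]

def Spec_solution (a : List Int) (out : Int) : Prop := out = solution_alt a
instance (a : List Int) (out : Int) : Decidable (Spec_solution a out) := by unfold Spec_solution; infer_instance

-- ===== CLAIM (what is proved, stated in full; the proofs are below) =====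
def Claim_equal_solution : Prop := ∀ (a : List Int), Dom_solution a → Pre_solution a → Spec_solution a (solution a)

-- ===== LEMMAS AND PROOFS =====

-- positions (starting at i) at which value x occurs in l
def occ (x : Int) : Int → List Int → List Int
  | _, [] => []
  | i, y :: l => if y = x then i :: occ x (i + 1) l else occ x (i + 1) l

-- the table row Python's 'info[b]' addresses (negative b wraps around)
def bidx (y : Int) : Int := if y < 0 then y + 500001 else y

-- positions whose value is stored in table row k
def occI (k : Int) : Int → List Int → List Int
  | _, [] => []
  | i, y :: l => if bidx y = k then i :: occI k (i + 1) l else occI k (i + 1) l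

-- A's inner loop rephrased as structural recursion over the occurrence list
def gl (alen : Int) : Int → Option Int → List Int → Int
  | _, _, [] => 0
  | prev, q, p :: rest =>
    if p = 0 ∨ q = some (p - 1) ∨ p - 1 = prev then
      if alen - 1 ≤ p then gl alen prev (some p) rest
      else if rest.head? = some (p + 1) then gl alen prev (some p) rest
      else 2 + gl alen (p + 1) (some p) rest
    else 2 + gl alen (p - 1) (some p) rest

-- A's per-value greedy replayed over the positions of the whole list;
-- b = "the previous position is unavailable as a left partner"
def greedy (x : Int) : Bool → List Int → Int
  | _, [] => 0
  | b, [y] => if y = x then (if b then 0 else 2) else 0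
  | b, y :: z :: rest =>
    if y = x then
      if b then (if z = x then greedy x true (z :: rest) else 2 + greedy x true rest)
      else 2 + greedy x true (z :: rest)
    else greedy x false (z :: rest)

theorem occ_ge (x : Int) : ∀ (l : List Int) (i : Int), ∀ e ∈ occ x i l, i ≤ e := by
  intro l
  induction l with
  | nil => intro i e he; simp [occ] at he
  | cons y l ih =>
    intro i e he
    simp only [occ] at he
    split at he
    · rcases List.mem_cons.1 he with h | h
      · omega
      · have := ih (i + 1) e h; omega
    · have := ih (i + 1) e he; omega

theorem occ_pairwise (x : Int) : ∀ (l : List Int) (i : Int), (occ x i l).Pairwise (· < ·) := by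
  intro l
  induction l with
  | nil => intro i; simp [occ]
  | cons y l ih =>
    intro i
    simp only [occ]
    split
    · exact List.Pairwise.cons (fun e he => by have := occ_ge x l (i + 1) e he; omega) (ih (i + 1))
    · exact ih (i + 1)

-- L1: the info table holds exactly the occurrence lists
theorem modify_getD (arr : Array (List Int)) (m : Nat) (i0 : Int) (k : Nat) (hk : k < arr.size) :
    (arr.modify m (fun l => l ++ [i0])).getD k []
      = if m = k then arr.getD k [] ++ [i0] else arr.getD k [] := by
  rw [Array.getD_eq_getD_getElem?, Array.getD_eq_getD_getElem?, Array.getElem?_modify]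
  by_cases h : m = k
  · simp [h, Array.getElem?_eq_getElem hk]
  · simp [h]

theorem aStore_getD (arr : Array (List Int)) (i0 y : Int) (hy : -500001 ≤ y ∧ y ≤ 500000)
    (hsz : arr.size = 500001) (k : Nat) (hk : k < 500001) :
    (aStore arr (i0, y)).getD k [] = if bidx y = (k : Int) then arr.getD k [] ++ [i0] else arr.getD k [] := by
  simp only [aStore]
  rw [show (if y < 0 then y + 500001 else y) = bidx y from rfl]
  rw [modify_getD arr (bidx y).toNat i0 k (by omega)]
  have hiff : ((bidx y).toNat = k) ↔ (bidx y = (k : Int)) := by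
    unfold bidx; split <;> omega
  by_cases h : bidx y = (k : Int)
  · rw [if_pos (hiff.2 h), if_pos h]
  · rw [if_neg (fun hh => h (hiff.1 hh)), if_neg h]

theorem info_getD : ∀ (l : List Int) (i0 : Int) (arr : Array (List Int)), arr.size = 500001 →
    (∀ x ∈ l, -500001 ≤ x ∧ x ≤ 500000) → ∀ k : Nat, k < 500001 →
    ((PySem.List.enumerate l i0).foldl aStore arr).getD k [] = arr.getD k [] ++ occI (k : Int) i0 l := by
  intro l
  induction l with
  | nil => intro i0 arr _ _ k _; simp [PySem.List.enumerate_nil, occI]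
  | cons y l ih =>
    intro i0 arr hsz hb k hk
    have hy := hb y (List.mem_cons_self ..)
    rw [PySem.List.enumerate_cons, List.foldl_cons,
      ih (i0 + 1) (aStore arr (i0, y)) (by simp [aStore, hsz]) (fun x hx => hb x (List.mem_cons_of_mem _ hx)) k hk,
      aStore_getD arr i0 y hy hsz k hk]
    simp only [occI]
    by_cases h : bidx y = (k : Int)
    · simp [h, List.append_assoc]
    · simp [h]

-- when every value stored in row k is the single value v, row k holds v's occurrences
theorem occI_eq_occ (k v : Int) : ∀ (l : List Int), (∀ y ∈ l, (bidx y = k ↔ y = v)) →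
    ∀ i, occI k i l = occ v i l := by
  intro l
  induction l with
  | nil => intro _ _; simp [occI, occ]
  | cons y l ih =>
    intro h i
    have hy := h y (List.mem_cons_self ..)
    have hrest := ih (fun z hz => h z (List.mem_cons_of_mem _ hz))
    simp only [occI, occ]
    by_cases hb : bidx y = k
    · rw [if_pos hb, if_pos (hy.1 hb), hrest]
    · rw [if_neg hb, if_neg (fun hv => hb (hy.2 hv)), hrest]


-- L2: A's index loop over the occurrence list equals the structural recursion gl
theorem inner_eq_gl (alen : Int) : ∀ (suf pre : List Int) (len0 prev : Int),
    ((pre ++ suf).Pairwise (· < ·)) →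
    (((List.range suf.length).map (fun k => pre.length + k)).foldl (aBody alen (pre ++ suf)) (len0, prev)).1
      = len0 + gl alen prev pre.getLast? suf := by
  intro suf
  induction suf with
  | nil => intro pre len0 prev _; simp [gl]
  | cons p tail ih =>
    intro pre len0 prev hpw
    have hrange : (List.range (p :: tail).length).map (fun k => pre.length + k)
        = pre.length :: (List.range tail.length).map (fun k => (pre ++ [p]).length + k) := by
      simp only [List.length_cons, List.range_succ_eq_map, List.map_cons, List.map_map]
      refine List.cons_eq_cons.2 ⟨by omega, ?_⟩
      exact List.map_congr_left (fun k _ => by simp [Function.comp]; omega)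
    -- value at index pre.length
    have hgetp : (pre ++ p :: tail).getD pre.length 0 = p := by
      rw [List.getD_eq_getElem?_getD, List.getElem?_append_right (le_refl _)]
      simp
    -- lookahead condition
    have hlook : ((pre.length + 1 < (pre ++ p :: tail).length ∧
        (pre ++ p :: tail).getD (pre.length + 1) 0 = p + 1) ↔ tail.head? = some (p + 1)) := by
      cases tail with
      | nil => simp
      | cons t r =>
        rw [List.getD_eq_getElem?_getD, List.getElem?_append_right (by omega)]
        have h1 : pre.length + 1 - pre.length = 1 := by omega
        rw [h1]
        simp [List.length_append]
    -- lookback condition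
    have hback : (PySem.List.pyGet? (pre ++ p :: tail) ((pre.length : Int) - 1) = some (p - 1))
        ↔ pre.getLast? = some (p - 1) := by
      cases pre with
      | nil =>
        simp only [List.nil_append, List.length_nil]
        rw [show (((0 : Nat) : Int) - 1) = -1 by simp, PySem.List.pyGet?_neg_one]
        have hL : (p :: tail).getLast? = some ((p :: tail).getLast (by simp)) :=
          List.getLast?_eq_some_getLast (by simp)
        rw [hL]
        have hmem := List.getLast_mem (l := p :: tail) (by simp)
        have : p ≤ (p :: tail).getLast (by simp) := by
          rcases List.mem_cons.1 hmem with h | h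
          · omega
          · have := (List.pairwise_cons.1 hpw).1 _ h; omega
        simp only [List.getLast?_nil]
        constructor
        · intro h
          simp only [Option.some.injEq] at h
          omega
        · intro h
          simp at h
      | cons q' pre' =>
        have hcast : ((q' :: pre').length : Int) - 1 = (((q' :: pre').length - 1 : Nat) : Int) := by
          simp
        rw [hcast, PySem.List.pyGet?_natCast, List.getElem?_append_left (by simp)]
        rw [List.getElem?_eq_getElem (by simp)]
        rw [List.getLast?_eq_some_getLast (by simp), List.getLast_eq_getElem]
        simp
    have hpw' : ((pre ++ [p]) ++ tail).Pairwise (· < ·) := by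
      simpa [List.append_assoc] using hpw
    have hlast' : (pre ++ [p]).getLast? = some p := by simp
    have happ : (pre ++ [p]) ++ tail = pre ++ p :: tail := by simp
    have ihtail := fun l0 pr => by
      have := ih (pre ++ [p]) l0 pr hpw'
      rwa [happ, hlast'] at this
    rw [hrange, List.foldl_cons]
    by_cases hcond : p = 0 ∨ pre.getLast? = some (p - 1) ∨ p - 1 = prev
    · by_cases hend : alen - 1 ≤ p
      · have hstep : aBody alen (pre ++ p :: tail) (len0, prev) pre.length = (len0, prev) := by
          simp only [aBody, hgetp]
          by_cases h0 : p = 0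
          · rw [if_pos h0, if_pos hend]
          · rw [if_neg h0]
            have hc : PySem.List.pyGet? (pre ++ p :: tail) ((pre.length : Int) - 1) = some (p - 1) ∨ p - 1 = (len0, prev).2 := by
              rcases hcond with h | h | h
              · exact absurd h h0
              · exact Or.inl (hback.2 h)
              · exact Or.inr h
            rw [if_pos hc, if_pos hend]
        rw [hstep, ihtail len0 prev]
        simp only [gl]
        rw [if_pos hcond, if_pos hend]
      · by_cases hnext : tail.head? = some (p + 1)
        · have hstep : aBody alen (pre ++ p :: tail) (len0, prev) pre.length = (len0, prev) := by
            simp only [aBody, hgetp]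
            by_cases h0 : p = 0
            · rw [if_pos h0, if_neg hend, if_pos (hlook.2 hnext)]
            · rw [if_neg h0]
              have hc : PySem.List.pyGet? (pre ++ p :: tail) ((pre.length : Int) - 1) = some (p - 1) ∨ p - 1 = (len0, prev).2 := by
                rcases hcond with h | h | h
                · exact absurd h h0
                · exact Or.inl (hback.2 h)
                · exact Or.inr h
              rw [if_pos hc, if_neg hend, if_pos (hlook.2 hnext)]
          rw [hstep, ihtail len0 prev]
          simp only [gl]
          rw [if_pos hcond, if_neg hend, if_pos hnext]
        · have hstep : aBody alen (pre ++ p :: tail) (len0, prev) pre.length = (len0 + 2, p + 1) := by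
            simp only [aBody, hgetp]
            by_cases h0 : p = 0
            · rw [if_pos h0, if_neg hend, if_neg (fun hc => hnext (hlook.1 hc))]
            · rw [if_neg h0]
              have hc : PySem.List.pyGet? (pre ++ p :: tail) ((pre.length : Int) - 1) = some (p - 1) ∨ p - 1 = (len0, prev).2 := by
                rcases hcond with h | h | h
                · exact absurd h h0
                · exact Or.inl (hback.2 h)
                · exact Or.inr h
              rw [if_pos hc, if_neg hend, if_neg (fun hc => hnext (hlook.1 hc))]
          rw [hstep, ihtail (len0 + 2) (p + 1)]
          simp only [gl]
          rw [if_pos hcond, if_neg hend, if_neg hnext]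
          ring
    · have h0 : ¬ p = 0 := fun h => hcond (Or.inl h)
      have hb2 : ¬ (PySem.List.pyGet? (pre ++ p :: tail) ((pre.length : Int) - 1) = some (p - 1) ∨ p - 1 = (len0, prev).2) := by
        rintro (h | h)
        · exact hcond (Or.inr (Or.inl (hback.1 h)))
        · exact hcond (Or.inr (Or.inr h))
      have hstep : aBody alen (pre ++ p :: tail) (len0, prev) pre.length = (len0 + 2, p - 1) := by
        simp only [aBody, hgetp]
        rw [if_neg h0, if_neg hb2]
      rw [hstep, ihtail (len0 + 2) (p - 1)]
      simp only [gl]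
      rw [if_neg hcond]
      ring


-- L3: gl over occurrences equals the position-replay greedy
theorem occ_head_iff (x : Int) (i : Int) (z : Int) (rest : List Int) :
    (occ x i (z :: rest)).head? = some i ↔ z = x := by
  simp only [occ]
  by_cases hz : z = x
  · simp [hz]
  · rw [if_neg hz]
    simp only [hz, iff_false]
    intro hh
    have : i ∈ occ x (i + 1) rest := by
      cases h : occ x (i + 1) rest with
      | nil => rw [h] at hh; simp at hh
      | cons a t => rw [h] at hh; simp at hh; simp [h, hh]
    have := occ_ge x rest (i + 1) i this
    omega

theorem gl_eq_greedy (x alen : Int) : ∀ (l : List Int) (i prev : Int) (q : Option Int),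
    0 ≤ i → alen = i + l.length → prev ≤ i - 1 → (∀ t, q = some t → t ≤ i - 1) → (i = 0 → prev = -1) →
    gl alen prev q (occ x i l) = greedy x (decide (prev = i - 1 ∨ q = some (i - 1))) l := by
  suffices H : ∀ (n : Nat) (l : List Int), l.length ≤ n → ∀ (i prev : Int) (q : Option Int),
      0 ≤ i → alen = i + l.length → prev ≤ i - 1 → (∀ t, q = some t → t ≤ i - 1) → (i = 0 → prev = -1) →
      gl alen prev q (occ x i l) = greedy x (decide (prev = i - 1 ∨ q = some (i - 1))) l by
    exact fun l => H l.length l le_rfl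
  intro n
  induction n with
  | zero =>
    intro l hl i prev q _ _ _ _ _
    have : l = [] := List.length_eq_zero_iff.1 (by omega)
    subst this
    simp [occ, gl, greedy]
  | succ n ihn =>
    intro l hl i prev q hi halen hprev hq h0
    cases l with
    | nil => simp [occ, gl, greedy]
    | cons y l =>
      simp only [List.length_cons] at hl halen
      by_cases hy : y = x
      · rw [show occ x i (y :: l) = i :: occ x (i + 1) l by simp [occ, hy]]
        rw [gl]
        by_cases hb : prev = i - 1 ∨ q = some (i - 1)
        · have hcg : (i = 0 ∨ q = some (i - 1) ∨ i - 1 = prev) := by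
            rcases hb with h | h
            · exact Or.inr (Or.inr h.symm)
            · exact Or.inr (Or.inl h)
          rw [if_pos hcg]
          cases l with
          | nil =>
            rw [if_pos (by simp at halen; omega)]
            simp [occ, gl, greedy, hy, hb]
          | cons z rest =>
            simp only [List.length_cons] at hl halen
            rw [if_neg (by push_cast at halen ⊢; omega)]
            by_cases hz : z = x
            · rw [if_pos ((occ_head_iff x (i+1) z rest).2 hz)]
              have hih := ihn (z :: rest) (by simp; omega) (i + 1) prev (some i) (by omega)
                (by simp only [List.length_cons]; push_cast at halen ⊢; omega) (by omega)
                (fun t ht => by injection ht with h; omega) (by omega)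
              rw [hih]
              have hb1 : (decide (prev = i + 1 - 1 ∨ some i = some (i + 1 - 1))) = true := by
                simp
              have hb2 : (decide (prev = i - 1 ∨ q = some (i - 1))) = true := by
                simpa using hb
              rw [hb1, hb2, greedy, if_pos hy]
              simp [hz]
            · rw [if_neg (fun h => hz ((occ_head_iff x (i+1) z rest).1 h))]
              rw [show occ x (i + 1) (z :: rest) = occ x (i + 2) rest by
                simp only [occ, if_neg hz]; ring_nf]
              have hih := ihn rest (by omega) (i + 2) (i + 1) (some i) (by omega)
                (by push_cast at halen ⊢; omega) (by omega)
                (fun t ht => by injection ht with h; omega) (by omega)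
              rw [hih]
              have hb1 : (decide (i + 1 = i + 2 - 1 ∨ some i = some (i + 2 - 1))) = true := by
                simp only [decide_eq_true_eq]
                left; ring
              have hb2 : (decide (prev = i - 1 ∨ q = some (i - 1))) = true := by
                simpa using hb
              rw [hb1, hb2, greedy, if_pos hy]
              simp [hz]
        · have hcg : ¬ (i = 0 ∨ q = some (i - 1) ∨ i - 1 = prev) := by
            rintro (h | h | h)
            · exact hb (Or.inl (by omega))
            · exact hb (Or.inr h)
            · exact hb (Or.inl h.symm)
          rw [if_neg hcg]
          have hih := ihn l (by omega) (i + 1) (i - 1) (some i) (by omega)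
            (by push_cast at halen ⊢; omega) (by omega)
            (fun t ht => by injection ht with h; omega) (by omega)
          rw [hih]
          have hb1 : (decide (i - 1 = i + 1 - 1 ∨ some i = some (i + 1 - 1))) = true := by
            simp only [decide_eq_true_eq, Option.some.injEq]
            right; ring
          have hb2 : (decide (prev = i - 1 ∨ q = some (i - 1))) = false := by
            simpa using hb
          rw [hb1, hb2]
          cases l with
          | nil => simp [greedy, hy, occ, gl]
          | cons z rest => rw [greedy, if_pos hy]; simp
      · rw [show occ x i (y :: l) = occ x (i + 1) l by simp [occ, hy]]
        have hih := ihn l (by omega) (i + 1) prev q (by omega)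
          (by push_cast at halen ⊢; omega) (by omega)
          (fun t ht => by have := hq t ht; omega) (by omega)
        rw [hih]
        have hb1 : (decide (prev = i + 1 - 1 ∨ q = some (i + 1 - 1))) = false := by
          simp only [decide_eq_false_iff_not]
          rintro (h | h)
          · omega
          · have := hq _ h; omega
        rw [hb1]
        cases l with
        | nil => simp [greedy, hy]
        | cons z rest => rw [greedy, if_neg hy]


-- L4: the position-replay greedy equals B's window scan
theorem greedy_eq_bScan (x : Int) : ∀ (l : List Int), greedy x true l = bScan x l := by
  intro l
  induction l using bScan.induct x with
  | case1 y z rest h ih =>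
    -- pair formed: exactly one of y, z equals x
    rw [bScan, if_pos h]
    rcases h with ⟨hyz, hne⟩
    by_cases hy : y = x
    · have hz : ¬ z = x := fun hz => hne (by rw [hy, hz])
      simp [greedy, hy, hz, ih]
    · have hz : z = x := by tauto
      subst hz
      rw [greedy, if_neg hy]
      cases rest with
      | nil => simp [greedy, bScan]
      | cons w r => simp [greedy, ih]
  | case2 y z rest h ih =>
    rw [bScan, if_neg h]
    by_cases hy : y = x
    · have hz : z = x := by
        by_contra hz
        by_cases hne : y = z
        · exact hz (hne ▸ hy)
        · exact h ⟨Or.inl hy, hne⟩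
      subst hz
      simpa [greedy, hy] using ih
    · -- y ≠ x : greedy true (y::z::rest) = greedy false (z::rest)
      rw [greedy, if_neg hy, ← ih]
      -- show greedy false (z::rest) = greedy true (z::rest) when z ≠ x, else both sides equal
      by_cases hz : z = x
      · -- then pair would need y ≠ z... but no pair: y ≠ z? if z = x and y ≠ x then y ≠ z so (y=x∨z=x)∧y≠z holds — contradiction
        exact absurd ⟨Or.inr hz, fun hyz => hy (hyz ▸ hz)⟩ h
      · cases rest with
        | nil => simp [greedy, hz]
        | cons w r => rw [greedy, if_neg hz, greedy, if_neg hz]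
  | case3 l h =>
    cases l with
    | nil => simp [greedy, bScan]
    | cons y t => cases t with
      | nil => simp [greedy, bScan]
      | cons z r => exact absurd rfl (h y z r)

theorem bScan_nonneg (x : Int) : ∀ (l : List Int), 0 ≤ bScan x l := by
  intro l
  induction l using bScan.induct x with
  | case1 y z rest h ih => simp only [bScan, if_pos h]; omega
  | case2 y z rest h ih => simpa [bScan, if_neg h] using ih
  | case3 l h => cases l with
    | nil => simp [bScan]
    | cons y t => cases t with
      | nil => simp [bScan]
      | cons z r => exact absurd rfl (h y z r)

theorem bScan_ne_zero_mem (x : Int) : ∀ (l : List Int), bScan x l ≠ 0 → x ∈ l := by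
  intro l
  induction l using bScan.induct x with
  | case1 y z rest h ih =>
    intro _
    rcases h.1 with h1 | h1
    · simp [h1]
    · simp [h1]
  | case2 y z rest h ih =>
    intro hne
    rw [bScan, if_neg h] at hne
    exact List.mem_cons_of_mem y (ih hne)
  | case3 l h =>
    intro hne
    exfalso
    cases l with
    | nil => simp [bScan] at hne
    | cons y t => cases t with
      | nil => simp [bScan] at hne
      | cons z r => exact h y z r rfl


-- L5: folding 'if m < F i then F i else m' is folding max
theorem ifmax (a b : Int) : (if a < b then b else a) = max a b := by
  by_cases h : a < b
  · rw [if_pos h, max_eq_right (le_of_lt h)]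
  · rw [if_neg h, max_eq_left (not_lt.1 h)]

theorem foldl_max_split (F : Int → Int) : ∀ (l : List Int) (m₁ m₂ : Int),
    l.foldl (fun m i => max m (F i)) (max m₁ m₂) = max m₁ (l.foldl (fun m i => max m (F i)) m₂) := by
  intro l
  induction l with
  | nil => intro m₁ m₂; simp
  | cons y l ih =>
    intro m₁ m₂
    simp only [List.foldl_cons]
    rw [max_assoc, ih]

theorem foldl_max_ge (F : Int → Int) : ∀ (l : List Int) (m : Int),
    m ≤ l.foldl (fun m i => max m (F i)) m := by
  intro l
  induction l with
  | nil => intro m; simp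
  | cons y l ih =>
    intro m
    simp only [List.foldl_cons]
    exact le_trans (le_max_left m (F y)) (ih (max m (F y)))

theorem foldl_max_filter (F : Int → Int) : ∀ (l : List Int) (m : Int), 0 ≤ m →
    l.foldl (fun m i => max m (F i)) m
      = (l.filter (fun i => decide (F i ≠ 0))).foldl (fun m i => max m (F i)) m := by
  intro l
  induction l with
  | nil => intro m _; simp
  | cons y l ih =>
    intro m hm
    by_cases h : F y = 0
    · rw [List.filter_cons_of_neg (by simp [h]), List.foldl_cons,
        max_eq_left (by omega), ih m hm]
    · rw [List.filter_cons_of_pos (by simp [h]), List.foldl_cons, List.foldl_cons]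
      exact ih (max m (F y)) (le_trans hm (le_max_left _ _))

theorem max_chain (F : Int → Int) (hF : ∀ i, 0 ≤ F i) (R S : List Int) (hRne : R ≠ [])
    (hmem : ∀ i, F i ≠ 0 → (i ∈ R ↔ i ∈ S)) (hR : R.Nodup) (hS : S.Nodup) :
    R.foldl (fun m i => max m (F i)) (-1) = S.foldl (fun m i => max m (F i)) 0 := by
  have hge : (0 : Int) ≤ R.foldl (fun m i => max m (F i)) (-1) := by
    cases R with
    | nil => exact absurd rfl hRne
    | cons r R' =>
      simp only [List.foldl_cons]
      calc (0 : Int) ≤ F r := hF r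
        _ ≤ max (-1) (F r) := le_max_right _ _
        _ ≤ _ := foldl_max_ge F R' _
  have h1 : R.foldl (fun m i => max m (F i)) (-1) = R.foldl (fun m i => max m (F i)) 0 := by
    have h2 : R.foldl (fun m i => max m (F i)) (max 0 (-1)) = max 0 (R.foldl (fun m i => max m (F i)) (-1)) :=
      foldl_max_split F R 0 (-1)
    rw [show max (0 : Int) (-1) = 0 from rfl] at h2
    rw [h2, max_eq_right hge]
  rw [h1, foldl_max_filter F R 0 le_rfl, foldl_max_filter F S 0 le_rfl]
  have hperm : (R.filter (fun i => decide (F i ≠ 0))).Perm (S.filter (fun i => decide (F i ≠ 0))) := by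
    apply List.perm_of_nodup_nodup_toFinset_eq (hR.filter _) (hS.filter _)
    ext x
    simp only [List.mem_toFinset, List.mem_filter, decide_eq_true_eq]
    constructor
    · rintro ⟨hx, hne⟩; exact ⟨(hmem x hne).1 hx, hne⟩
    · rintro ⟨hx, hne⟩; exact ⟨(hmem x hne).2 hx, hne⟩
  exact hperm.foldl_eq' (fun x _ y _ z => by
    rw [max_assoc, max_comm (F x) (F y), ← max_assoc]) 0

theorem solution_spec : Claim_equal_solution := by
  unfold Claim_equal_solution
  intro a _ hpre
  unfold Spec_solution
  unfold Pre_solution at hpre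
  by_cases hlen : a.length ≤ 1
  · rw [solution, solution_alt, if_pos hlen, if_pos hlen]
  · rw [solution, solution_alt, if_neg hlen, if_neg hlen]
    -- wv i = the single value A's table row i collects (under Pre_)
    have hwb : ∀ x ∈ a, (if (bidx x - 500001) ∈ a then bidx x - 500001 else bidx x) = x := by
      intro x hx
      obtain ⟨hlo, hhi, hal⟩ := hpre x hx
      by_cases hneg : x < 0
      · rw [show bidx x = x + 500001 by unfold bidx; rw [if_pos hneg]]
        rw [if_pos (by simpa using hx)]
        ring
      · rw [show bidx x = x by unfold bidx; rw [if_neg hneg]]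
        rw [if_neg (fun hmem => (hpre x hx).2.2 _ hmem (by ring))]
    have hbb : ∀ x ∈ a, 0 ≤ bidx x ∧ bidx x < 500001 := by
      intro x hx
      obtain ⟨hlo, hhi, -⟩ := hpre x hx
      unfold bidx; split <;> omega
    have hstep : ∀ (m i : Int), i ∈ PySem.List.pyRange 0 500001 1 →
        outerBody (a.length) (buildInfo a) m i
          = max m (bScan (if (i - 500001) ∈ a then i - 500001 else i) a) := by
      intro m i hi
      have hi' : 0 ≤ i ∧ i < 500001 := PySem.List.mem_pyRange_one.1 hi
      have hv : (buildInfo a).getD i.toNat [] = occI i 0 a := by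
        have h := info_getD a 0 (Array.replicate 500001 []) (Array.size_replicate)
          (fun x hx => ⟨(hpre x hx).1, (hpre x hx).2.1⟩) i.toNat (by omega)
        rw [show ((i.toNat : Nat) : Int) = i by omega] at h
        have hrep : (Array.replicate 500001 ([] : List Int)).getD i.toNat [] = [] := by
          rw [Array.getD_eq_getD_getElem?, Array.getElem?_replicate, if_pos (by omega)]
          rfl
        rw [hrep, List.nil_append] at h
        rw [buildInfo]
        exact h
      have hocc : occI i 0 a = occ (if (i - 500001) ∈ a then i - 500001 else i) 0 a := by
        apply occI_eq_occ
        intro y hy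
        constructor
        · intro h
          rw [← h]
          exact (hwb y hy).symm
        · intro h
          by_cases hc : (i - 500001) ∈ a
          · rw [if_pos hc] at h
            subst h
            unfold bidx
            rw [if_pos (by omega)]
            ring
          · rw [if_neg hc] at h
            subst h
            unfold bidx
            rw [if_neg (by omega)]
      rw [hocc] at hv
      have hpw : (occ (if (i - 500001) ∈ a then i - 500001 else i) 0 a).Pairwise (· < ·) :=
        occ_pairwise _ a 0
      have h2 := inner_eq_gl (a.length) (occ (if (i - 500001) ∈ a then i - 500001 else i) 0 a)
        [] 0 (-1) (by simpa using hpw)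
      rw [show ((List.range (occ (if (i - 500001) ∈ a then i - 500001 else i) 0 a).length).map
          (fun k => (List.length ([] : List Int)) + k))
          = List.range (occ (if (i - 500001) ∈ a then i - 500001 else i) 0 a).length by simp] at h2
      have h3 := gl_eq_greedy (if (i - 500001) ∈ a then i - 500001 else i) (a.length) a 0 (-1) none
        le_rfl (by simp) (by omega) (fun t ht => by cases ht) (fun _ => rfl)
      rw [show (decide ((-1 : Int) = 0 - 1 ∨ (none : Option Int) = some (0 - 1))) = true by decide] at h3
      rw [greedy_eq_bScan] at h3
      simp only [List.nil_append, List.getLast?_nil, zero_add] at h2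
      rw [outerBody, hv, h2, h3, ifmax]
    rw [PySem.List.foldl_congr_mem _ _
      (fun m i => max m (bScan (if (i - 500001) ∈ a then i - 500001 else i) a)) _
      (fun m i hi => hstep m i hi)]
    have hBmap : (PySem.Set.ofList a).foldl
        (fun best x => let cnt := bScan x a; if best < cnt then cnt else best) 0
        = ((PySem.Set.ofList a).map bidx).foldl
          (fun m i => max m (bScan (if (i - 500001) ∈ a then i - 500001 else i) a)) 0 := by
      rw [List.foldl_map]
      apply PySem.List.foldl_congr_mem
      intro m x hx
      have hxa := (PySem.Set.mem_ofList a x).1 hx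
      rw [hwb x hxa]
      exact ifmax m (bScan x a)
    rw [hBmap]
    apply max_chain (fun i => bScan (if (i - 500001) ∈ a then i - 500001 else i) a)
      (fun i => bScan_nonneg _ a)
    · rw [PySem.List.pyRange_one_cons (by omega)]
      simp
    · intro i hne
      have hva : (if (i - 500001) ∈ a then i - 500001 else i) ∈ a := bScan_ne_zero_mem _ a hne
      constructor
      · intro hiR
        have hi' := PySem.List.mem_pyRange_one.1 hiR
        refine List.mem_map.2 ⟨_, (PySem.Set.mem_ofList a _).2 hva, ?_⟩
        by_cases hc : (i - 500001) ∈ a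
        · simp only [if_pos hc]
          unfold bidx
          rw [if_pos (by omega)]
          ring
        · simp only [if_neg hc]
          unfold bidx
          rw [if_neg (by omega)]
      · intro hiM
        obtain ⟨x, hxS, rfl⟩ := List.mem_map.1 hiM
        have hxa := (PySem.Set.mem_ofList a x).1 hxS
        exact PySem.List.mem_pyRange_one.2 (by have := hbb x hxa; omega)
    · exact PySem.List.nodup_pyRange_one 0 500001
    · apply List.Nodup.map_on ?_ (PySem.Set.nodup_ofList a)
      intro x hxS y hyS hxy
      have hxa := (PySem.Set.mem_ofList a x).1 hxS
      have hya := (PySem.Set.mem_ofList a y).1 hyS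
      obtain ⟨hx1, hx2, hxal⟩ := hpre x hxa
      obtain ⟨hy1, hy2, hyal⟩ := hpre y hya
      have hxy' := hxal y hya
      have hyx' := hyal x hxa
      unfold bidx at hxy
      split_ifs at hxy <;> omega
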